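-- pv_equiv track=rewrite | github.com/parphis/ppnb | db.py | show_workhours
-- ===== SOURCE A (Python) =====
-- def create_table_header(**head):
--   res = ""
--   for key, value in head.items():
--     res += str(key).ljust(value) + "|"
--   res += "\n"
--   for key, value in head.items():
--     res += "".ljust(value, "-") + "|"
--   return res
--
-- def show_workhours(rows, format):
--   res = create_table_header(**{'ID':4, 'Dátum':10, 'Kezd.':5, 'Bef.':5, 'Cég':10, 'Proj.':10, 'Leírás':65})
--   for row in rows:
--     res += "\n" + str(row[0]).rjust(4) + "|"
--     res += str(row[1]).ljust(10) + "|"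
--     res += (row[2].ljust(5) if row[2] else " ~ ".ljust(5)) + "|"
--     res += (row[3].ljust(5) if row[3] else " ~ ".ljust(5)) + "|"
--     res += ((row[5][:10]).ljust(10) if row[5] else " ~ ".ljust(10)) + "|"
--     res += ((row[6][:10]).ljust(10) if row[6] else " ~ ".ljust(10)) + "|"
--     res += ((row[4][:65]).ljust(65) if row[4] else " ~ ".ljust(65)) + "|"
--   return res
-- ===== SOURCE B (Python) =====
-- # Spec-table driven rewrite: one loop over a column-spec list instead of seven
-- # hand-written lines; builds lines and joins them.
--
-- HEAD = [('ID', 4), ('D\u00e1tum', 10), ('Kezd.', 5), ('Bef.', 5),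
--         ('C\u00e9g', 10), ('Proj.', 10), ('Le\u00edr\u00e1s', 65)]
--
-- # (tuple index, left-justify?, width, truncate?, dash-default-on-falsy?)
-- SPEC = [(0, False, 4, False, False),
--         (1, True, 10, False, False),
--         (2, True, 5, False, True),
--         (3, True, 5, False, True),
--         (5, True, 10, True, True),
--         (6, True, 10, True, True),
--         (4, True, 65, True, True)]
--
-- def show_workhours(rows, format):
--     lines = ['|'.join(name.ljust(w) for name, w in HEAD) + '|',
--              '|'.join('-' * w for _, w in HEAD) + '|']
--     for row in rows:
--         cells = []
--         for idx, left, w, trunc, dash in SPEC: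
--             v = row[idx]
--             if dash and not v:
--                 cells.append(' ~ '.ljust(w))
--             else:
--                 s = str(v)
--                 if trunc:
--                     s = s[:w]
--                 cells.append(s.ljust(w) if left else s.rjust(w))
--         lines.append('|'.join(cells) + '|')
--     return '\n'.join(lines)
-- ===== Notes on version B (the rewrite author's own statement) =====
-- stated objective: simpler
-- what changed: Replaces seven hand-written per-column concatenation statements with a single data-driven loop over a column-spec table (index, justify, width, truncate, dash-default) and builds the output as '|'/'\n'-joined lines instead of string +=.
import Mathlib
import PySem

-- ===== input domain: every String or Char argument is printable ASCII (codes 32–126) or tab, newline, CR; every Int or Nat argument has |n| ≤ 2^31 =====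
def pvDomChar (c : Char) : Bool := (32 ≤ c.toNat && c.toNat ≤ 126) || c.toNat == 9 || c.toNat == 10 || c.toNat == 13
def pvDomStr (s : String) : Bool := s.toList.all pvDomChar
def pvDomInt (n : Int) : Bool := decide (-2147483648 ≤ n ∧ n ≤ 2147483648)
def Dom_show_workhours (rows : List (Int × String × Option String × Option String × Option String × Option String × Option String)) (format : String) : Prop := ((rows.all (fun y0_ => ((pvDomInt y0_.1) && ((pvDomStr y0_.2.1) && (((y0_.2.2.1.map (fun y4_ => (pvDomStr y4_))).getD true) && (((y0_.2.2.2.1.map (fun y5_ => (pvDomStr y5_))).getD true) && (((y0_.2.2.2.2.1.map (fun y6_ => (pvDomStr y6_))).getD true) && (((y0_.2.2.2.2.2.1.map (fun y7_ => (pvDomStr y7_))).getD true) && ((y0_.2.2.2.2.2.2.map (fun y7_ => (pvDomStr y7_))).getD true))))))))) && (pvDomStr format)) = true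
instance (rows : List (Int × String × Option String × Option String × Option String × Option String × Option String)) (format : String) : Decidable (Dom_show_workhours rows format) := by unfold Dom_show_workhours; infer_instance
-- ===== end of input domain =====

-- B replaces A's seven hand-written per-column statements by one loop over a column-spec
-- table and joins lines; return values proved equal on all inputs (A is total).
-- Both ports work on List Char; str.ljust/rjust are ported by hand below (exact: Python
-- pads with the fill char to a width counted in code points).

abbrev PvRow := Int × String × Option String × Option String × Option String × Option String × Option String

-- ===== PORT A =====
-- s.ljust(w, fill) and s.rjust(w) on code points (exact)
def pvLjust (s : List Char) (w : Nat) (fill : Char) : List Char := s ++ List.replicate (w - s.length) fill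
def pvRjust (s : List Char) (w : Nat) : List Char := List.replicate (w - s.length) ' ' ++ s
-- Python truthiness of an Option String cell (None and '' are falsy)
def pvTruthy (o : Option String) : Bool := match o with | none => false | some s => !s.toList.isEmpty

-- create_table_header(**head); the **kwargs dict is ported as an association list in order
def create_table_header (head : List (List Char × Nat)) : List Char :=
  let res := head.foldl (fun r kv => r ++ (pvLjust kv.1 kv.2 ' ' ++ [ '|' ])) []
  let res := res ++ [ '\n' ]
  head.foldl (fun r kv => r ++ (pvLjust [] kv.2 '-' ++ [ '|' ])) res

def pvHeaderDict : List (List Char × Nat) :=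
  [("ID".toList, 4), ("Dátum".toList, 10), ("Kezd.".toList, 5), ("Bef.".toList, 5),
   ("Cég".toList, 10), ("Proj.".toList, 10), ("Leírás".toList, 65)]

def pvChunkA (row : PvRow) : List Char :=
  ('\n' :: pvRjust (PySem.Int.toStr row.1).toList 4 ++ [ '|' ]) ++
  (pvLjust row.2.1.toList 10 ' ' ++ [ '|' ]) ++
  ((if pvTruthy row.2.2.1 then pvLjust (row.2.2.1.getD "").toList 5 ' ' else pvLjust " ~ ".toList 5 ' ') ++ [ '|' ]) ++
  ((if pvTruthy row.2.2.2.1 then pvLjust (row.2.2.2.1.getD "").toList 5 ' ' else pvLjust " ~ ".toList 5 ' ') ++ [ '|' ]) ++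
  ((if pvTruthy row.2.2.2.2.2.1 then pvLjust ((row.2.2.2.2.2.1.getD "").toList.take 10) 10 ' ' else pvLjust " ~ ".toList 10 ' ') ++ [ '|' ]) ++
  ((if pvTruthy row.2.2.2.2.2.2 then pvLjust ((row.2.2.2.2.2.2.getD "").toList.take 10) 10 ' ' else pvLjust " ~ ".toList 10 ' ') ++ [ '|' ]) ++
  ((if pvTruthy row.2.2.2.2.1 then pvLjust ((row.2.2.2.2.1.getD "").toList.take 65) 65 ' ' else pvLjust " ~ ".toList 65 ' ') ++ [ '|' ])

def show_workhours (rows : List PvRow) (_format : String) : String :=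
  let res := create_table_header pvHeaderDict
  String.ofList (rows.foldl (fun res row => res ++ pvChunkA row) res)

-- ===== PORT B =====
def pvHead : List (String × Nat) :=
  [("ID", 4), ("Dátum", 10), ("Kezd.", 5), ("Bef.", 5), ("Cég", 10), ("Proj.", 10), ("Leírás", 65)]

-- (tuple index, left-justify?, width, truncate?, dash-default-on-falsy?)
def pvSpec : List (Nat × Bool × Nat × Bool × Bool) :=
  [(0, false, 4, false, false), (1, true, 10, false, false), (2, true, 5, false, true),
   (3, true, 5, false, true), (5, true, 10, true, true), (6, true, 10, true, true),
   (4, true, 65, true, true)]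

-- str(row[idx]) and truthiness of row[idx], for the indices the spec table uses
def pvFieldStr (row : PvRow) (i : Nat) : List Char := match i with
  | 0 => (PySem.Int.toStr row.1).toList
  | 1 => row.2.1.toList
  | 2 => (row.2.2.1.getD "").toList
  | 3 => (row.2.2.2.1.getD "").toList
  | 4 => (row.2.2.2.2.1.getD "").toList
  | 5 => (row.2.2.2.2.2.1.getD "").toList
  | _ => (row.2.2.2.2.2.2.getD "").toList

def pvFieldTruthy (row : PvRow) (i : Nat) : Bool := match i with
  | 0 => row.1 != 0
  | 1 => !row.2.1.toList.isEmpty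
  | 2 => pvTruthy row.2.2.1
  | 3 => pvTruthy row.2.2.2.1
  | 4 => pvTruthy row.2.2.2.2.1
  | 5 => pvTruthy row.2.2.2.2.2.1
  | _ => pvTruthy row.2.2.2.2.2.2

def pvCell (row : PvRow) (s : Nat × Bool × Nat × Bool × Bool) : List Char :=
  if s.2.2.2.2 && !pvFieldTruthy row s.1 then pvLjust " ~ ".toList s.2.2.1 ' '
  else
    let v := pvFieldStr row s.1
    let v := if s.2.2.2.1 then v.take s.2.2.1 else v
    if s.2.1 then pvLjust v s.2.2.1 ' ' else pvRjust v s.2.2.1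

def show_workhours_alt (rows : List PvRow) (_format : String) : String :=
  let headerLine := PySem.Chars.join [ '|' ] (pvHead.map (fun p => pvLjust p.1.toList p.2 ' ')) ++ [ '|' ]
  let dashLine := PySem.Chars.join [ '|' ] (pvHead.map (fun p => List.replicate p.2 '-')) ++ [ '|' ]
  let body := rows.map (fun row => PySem.Chars.join [ '|' ] (pvSpec.map (pvCell row)) ++ [ '|' ])
  String.ofList (PySem.Chars.join [ '\n' ] (headerLine :: dashLine :: body))

-- ===== PRECONDITION & SPEC =====
def Spec_show_workhours (rows : List (Int × String × Option String × Option String × Option String × Option String × Option String)) (format : String) (out : String) : Prop := out = show_workhours_alt rows format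
instance (rows : List (Int × String × Option String × Option String × Option String × Option String × Option String)) (format : String) (out : String) : Decidable (Spec_show_workhours rows format out) := by unfold Spec_show_workhours; infer_instance

-- ===== CLAIM (what is proved, stated in full; the proofs are below) =====
def Claim_equal_show_workhours : Prop := ∀ (rows : List (Int × String × Option String × Option String × Option String × Option String × Option String)) (format : String), Dom_show_workhours rows format → Spec_show_workhours rows format (show_workhours rows format)

-- ===== LEMMAS AND PROOFS =====

-- B's line for one row equals A's chunk for that row minus its leading newline
lemma pv_line_eq (row : PvRow) :
    PySem.Chars.join [ '|' ] (pvSpec.map (pvCell row)) ++ [ '|' ] = (pvChunkA row).tail := by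
  simp only [pvSpec, List.map, PySem.Chars.join_cons_cons, PySem.Chars.join_singleton, pvCell,
    pvFieldStr, pvFieldTruthy, pvChunkA]
  cases h2 : pvTruthy row.2.2.1 <;> cases h3 : pvTruthy row.2.2.2.1 <;>
    cases h4 : pvTruthy row.2.2.2.2.1 <;> cases h5 : pvTruthy row.2.2.2.2.2.1 <;>
    cases h6 : pvTruthy row.2.2.2.2.2.2 <;> simp

lemma pv_chunk_tail (row : PvRow) : '\n' :: (pvChunkA row).tail = pvChunkA row := by
  simp [pvChunkA]

-- B's line with its joining newline is exactly A's per-row chunk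
lemma pv_full_line (row : PvRow) :
    '\n' :: (PySem.Chars.join [ '|' ] (pvSpec.map (pvCell row)) ++ [ '|' ]) = pvChunkA row := by
  rw [pv_line_eq, pv_chunk_tail]

-- A's header block written as B builds it
set_option maxRecDepth 4096 in
lemma pv_header_eq :
    create_table_header pvHeaderDict =
      (PySem.Chars.join [ '|' ] (pvHead.map (fun p => pvLjust p.1.toList p.2 ' ')) ++ [ '|' ]) ++
        '\n' :: (PySem.Chars.join [ '|' ] (pvHead.map (fun p => List.replicate p.2 '-')) ++ [ '|' ]) := by
  decide

lemma pv_join_nl (a : List Char) (ls : List (List Char)) :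
    PySem.Chars.join [ '\n' ] (a :: ls) = a ++ (ls.map (fun l => '\n' :: l)).flatten := by
  induction ls generalizing a with
  | nil => simp [PySem.Chars.join_singleton]
  | cons b bs ih => simp [PySem.Chars.join_cons_cons, ih]

-- ===== VERDICT (by name: the statement is the Claim_ definition above) =====
theorem show_workhours_spec : Claim_equal_show_workhours := by
  intro rows format _
  unfold Spec_show_workhours
  dsimp only [show_workhours, show_workhours_alt]
  rw [PySem.List.foldl_append_eq_flatMap pvChunkA rows (create_table_header pvHeaderDict)]
  rw [pv_join_nl, List.map_cons, List.flatten_cons, List.map_map]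
  rw [show ((fun l => '\n' :: l) ∘ fun row =>
        PySem.Chars.join [ '|' ] (pvSpec.map (pvCell row)) ++ [ '|' ]) = pvChunkA
      from funext pv_full_line]
  rw [pv_header_eq, List.flatMap_def]
  simp only [List.append_assoc, List.cons_append]
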